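-- pv_equiv track=rewrite | github.com/cogito30/py_coding_test | programmers/Lv0/181872.py | solution
-- ===== SOURCE A (Python) =====
-- def solution(myString, pat):
--     answer = ''
--
--     idx = 0
--     for i in range(len(myString)):
--         if myString[i:i+len(pat)] == pat:
--             idx = i
--     answer = myString[:idx+len(pat)]
--     return answer
-- ===== SOURCE B (Python) =====
-- def solution(myString, pat):
--     # Search for the reversed pattern in the reversed string: its FIRST
--     # occurrence corresponds to the LAST occurrence of pat in myString.
--     p = myString[::-1].find(pat[::-1])
--     idx = len(myString) - len(pat) - p if p != -1 else 0
--     return myString[:idx + len(pat)]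
-- ===== Notes on version B (the rewrite author's own statement) =====
-- stated objective: alternative
-- what changed: Instead of checking a slice at every index and remembering the last hit, B reverses both strings, takes the FIRST occurrence of the reversed pattern with one str.find, and converts that position arithmetically to the last occurrence (keeping A's not-found default idx=0).
-- intended difference: On inputs with pat == '' and myString nonempty, A returns myString without its last character (the loop's last index is len-1, an artefact), while B returns all of myString, since the last occurrence of the empty pattern is at position len(myString), which is the intended 'prefix up to the last occurrence'. — e.g. on solution("ab", ""): A returns "a", B returns "ab"
import Mathlib
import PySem

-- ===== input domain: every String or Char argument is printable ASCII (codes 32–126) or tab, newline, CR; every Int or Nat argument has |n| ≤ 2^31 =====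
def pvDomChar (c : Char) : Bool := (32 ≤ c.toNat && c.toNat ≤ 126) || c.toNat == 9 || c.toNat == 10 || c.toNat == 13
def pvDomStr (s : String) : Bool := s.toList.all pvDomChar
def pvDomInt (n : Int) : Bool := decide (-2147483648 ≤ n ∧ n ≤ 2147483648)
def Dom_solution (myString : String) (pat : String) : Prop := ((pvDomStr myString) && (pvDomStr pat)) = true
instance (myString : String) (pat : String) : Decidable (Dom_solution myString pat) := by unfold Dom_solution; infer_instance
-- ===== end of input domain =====

-- B drops A's index-by-index scan entirely: it reverses both strings, locates the FIRST
-- occurrence of the reversed pattern with one find, and converts that position arithmetically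
-- to the last occurrence (keeping A's not-found default idx = 0); B returns the full string
-- when pat = "" (stated as the intended difference D_ below).

-- ===== PORT A =====
def solution (myString : String) (pat : String) : String :=
  let idx : Int :=
    (PySem.List.pyRange 0 (PySem.Str.len myString) 1).foldl
      (fun idx i =>
        if PySem.Str.slice myString (some i) (some (i + PySem.Str.len pat)) = pat then i else idx)
      0
  PySem.Str.slice myString none (some (idx + PySem.Str.len pat))

-- ===== PORT B =====
def solution_alt (myString : String) (pat : String) : String :=
  -- myString[::-1] and pat[::-1] ported as list reversal (exact: a [::-1] slice is the reverse)
  let p : Int := PySem.Chars.find myString.toList.reverse pat.toList.reverse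
  let idx : Int := if p ≠ -1 then PySem.Str.len myString - PySem.Str.len pat - p else 0
  PySem.Str.slice myString none (some (idx + PySem.Str.len pat))

-- ===== PRECONDITION & SPEC =====
-- On inputs with pat = "" and myString nonempty, A returns myString without its last character
-- (the loop's last index is len-1, an artefact), while B returns all of myString, since the last
-- occurrence of the empty pattern is at position len(myString) — the intended prefix.
def D_solution (myString : String) (pat : String) : Prop := pat = "" ∧ myString ≠ ""
instance (myString : String) (pat : String) : Decidable (D_solution myString pat) := by
  unfold D_solution; infer_instance

def Spec_solution (myString : String) (pat : String) (out : String) : Prop :=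
  ¬ D_solution myString pat → out = solution_alt myString pat
instance (myString : String) (pat : String) (out : String) : Decidable (Spec_solution myString pat out) := by
  unfold Spec_solution; infer_instance

def pvDiffWitness_solution : String × String := ("ab", "")
def pvDiffWitnessOut_solution : String × String := ("a", "ab")

-- ===== CLAIM (what is proved, stated in full; the proofs are below) =====
def Claim_unchanged_solution : Prop := ∀ (myString : String) (pat : String), Dom_solution myString pat → Spec_solution myString pat (solution myString pat)
def Claim_changed_solution : Prop := Dom_solution (pvDiffWitness_solution.1) (pvDiffWitness_solution.2) ∧ D_solution (pvDiffWitness_solution.1) (pvDiffWitness_solution.2) ∧ solution (pvDiffWitness_solution.1) (pvDiffWitness_solution.2) = pvDiffWitnessOut_solution.1 ∧ solution_alt (pvDiffWitness_solution.1) (pvDiffWitness_solution.2) = pvDiffWitnessOut_solution.2 ∧ pvDiffWitnessOut_solution.1 ≠ pvDiffWitnessOut_solution.2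
def Claim_exact_solution : Prop := ∀ (myString : String) (pat : String), Dom_solution myString pat → D_solution myString pat → solution myString pat ≠ solution_alt myString pat

-- ===== LEMMAS AND PROOFS =====

-- Last index j < k with Q j (default 0): the value of A's accumulator after scanning 0..k-1.
def lastIdx (Q : Nat → Bool) : Nat → Int
  | 0 => 0
  | k+1 => if Q k then (k : Int) else lastIdx Q k

-- A's loop test at index j is "pat is a prefix of the suffix of myString at j".
theorem condA (s pat : String) (j : Nat) :
    (PySem.Str.slice s (some (j:Int)) (some ((j:Int) + PySem.Str.len pat)) = pat)
    ↔ pat.toList.isPrefixOf (s.toList.drop j) = true := by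
  rw [← String.toList_inj]
  have hlen : PySem.Str.len pat = ((pat.toList.length : Nat) : Int) := by simp [pysem]
  rw [hlen,
    show (PySem.Str.slice s (some (j:Int)) (some ((j:Int) + (pat.toList.length : Int)))).toList
      = PySem.List.slice s.toList (some (j:Int)) (some ((j:Int) + (pat.toList.length : Int))) from by simp [pysem],
    PySem.List.slice_natCast_add, List.isPrefixOf_iff_prefix, List.prefix_iff_eq_take]
  exact eq_comm

-- A's loop computes lastIdx of that predicate.
theorem foldA_eq_lastIdx (s pat : String) (k : Nat) :
    (PySem.List.pyRange 0 (k : Int) 1).foldl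
      (fun idx i =>
        if PySem.Str.slice s (some i) (some (i + PySem.Str.len pat)) = pat then i else idx)
      0
    = lastIdx (fun j => pat.toList.isPrefixOf (s.toList.drop j)) k := by
  induction k with
  | zero => simp [PySem.List.pyRange_one_eq_nil, lastIdx]
  | succ k ih =>
    rw [show ((k+1 : Nat) : Int) = (k : Int) + 1 by push_cast; ring,
      PySem.List.pyRange_one_succ_right (by omega : (0:Int) ≤ (k:Int)), List.foldl_append]
    simp only [List.foldl_cons, List.foldl_nil, ih, lastIdx]
    by_cases h : pat.toList.isPrefixOf (List.drop k s.toList) = true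
    · rw [if_pos ((condA s pat k).2 h), if_pos h]
    · rw [if_neg (fun hc => h ((condA s pat k).1 hc)), if_neg h]

theorem lastIdx_zero_of_none (Q : Nat → Bool) (k : Nat) (h : ∀ j, j < k → Q j = false) :
    lastIdx Q k = 0 := by
  induction k with
  | zero => rfl
  | succ k ih =>
    show (if Q k then _ else _) = _
    rw [h k (by omega), if_neg (by simp)]
    exact ih (fun j hj => h j (by omega))

theorem lastIdx_greatest (Q : Nat → Bool) (k j0 : Nat) (hj : j0 < k) (hQ : Q j0 = true)
    (hmax : ∀ j, j0 < j → j < k → Q j = false) : lastIdx Q k = (j0 : Int) := by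
  induction k with
  | zero => omega
  | succ k ih =>
    show (if Q k then _ else _) = _
    by_cases hk : j0 = k
    · subst hk; rw [if_pos hQ]
    · rw [hmax k (by omega) (by omega), if_neg (by simp)]
      exact ih (by omega) (fun j h1 h2 => hmax j h1 (by omega))

-- Occurrence transfer: an occurrence of q.reverse at i in t.reverse is an occurrence of q
-- at t.length - q.length - i in t.
theorem occ_rev (t q : List Char) (i : Nat) (hi : i + q.length ≤ t.length) :
    (q.reverse <+: t.reverse.drop i) ↔ q <+: t.drop (t.length - q.length - i) := by
  have hA1 : (t.take (t.length - i)).reverse = t.reverse.drop i := by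
    rw [List.reverse_take]; congr 1; omega
  have hA2 : (t.take (t.length - i)).length = t.length - i := by
    rw [List.length_take]; omega
  have step1 : (t.take (t.length - i)).reverse.take q.length
      = ((t.take (t.length - i)).drop ((t.length - i) - q.length)).reverse := by
    rw [List.reverse_drop, hA2]; congr 1; omega
  have step2 : ((t.take (t.length - i)).drop ((t.length - i) - q.length))
      = (t.drop (t.length - q.length - i)).take q.length := by
    rw [List.drop_take, show (t.length - i) - ((t.length - i) - q.length) = q.length by omega,
        show (t.length - i) - q.length = t.length - q.length - i by omega]
  have h3 : (t.take (t.length - i)).reverse.take q.length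
      = ((t.drop (t.length - q.length - i)).take q.length).reverse :=
    step1.trans (congrArg List.reverse step2)
  rw [List.prefix_iff_eq_take, List.prefix_iff_eq_take, ← hA1, List.length_reverse, h3]
  constructor
  · intro h; have := congrArg List.reverse h; simpa using this
  · intro h; exact congrArg List.reverse h

theorem prefix_drop_false (t q : List Char) (j : Nat) (hq : q ≠ []) (hj : t.length < j + q.length) :
    q.isPrefixOf (t.drop j) = false := by
  by_contra hc
  have hQ : q.isPrefixOf (t.drop j) = true := by simpa using hc
  have hle := (List.isPrefixOf_iff_prefix.mp hQ).length_le
  rw [List.length_drop] at hle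
  have hm : 0 < q.length := List.length_pos_of_ne_nil hq
  omega

theorem main_eq (s pat : String) (h : ¬ (pat = "" ∧ s ≠ "")) :
    solution s pat = solution_alt s pat := by
  by_cases hp : pat = ""
  · have hs : s = "" := by by_cases hs : s = ""; exact hs; exact absurd ⟨hp, hs⟩ h
    subst hp; subst hs; decide
  · show PySem.Str.slice s none (some (_ + _)) = PySem.Str.slice s none (some (_ + _))
    congr 3
    have hlen : PySem.Str.len s = ((s.toList.length : Nat) : Int) := by simp [pysem]
    have hlenp : PySem.Str.len pat = ((pat.toList.length : Nat) : Int) := by simp [pysem]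
    rw [hlen, foldA_eq_lastIdx]
    have hq : pat.toList ≠ [] := fun hc => hp (String.toList_eq_nil_iff.mp hc)
    set t := s.toList with ht
    set q := pat.toList with hqdef
    set p := PySem.Chars.find t.reverse q.reverse with hpdef
    by_cases hfind : p = -1
    · rw [if_neg (by simp [hfind])]
      apply lastIdx_zero_of_none
      intro j hj
      have hninf : ¬ q.reverse <:+: t.reverse :=
        (PySem.Chars.find_eq_neg_one_iff t.reverse q.reverse).mp hfind
      rw [List.reverse_infix] at hninf
      by_contra hc
      have hQ : q.isPrefixOf (t.drop j) = true := by simpa using hc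
      exact hninf ((List.isPrefixOf_iff_prefix.mp hQ).isInfix.trans (List.drop_suffix j t).isInfix)
    · rw [if_pos hfind]
      have hpos : 0 ≤ p := by
        have := PySem.Chars.neg_one_le_find t.reverse q.reverse
        rw [← hpdef] at this; omega
      obtain ⟨hocc, hmin⟩ := PySem.Chars.find_spec hpos
      have hbound : p.toNat + q.length ≤ t.length := by
        have h1 := hocc.length_le
        rw [List.length_reverse, List.length_drop, List.length_reverse] at h1
        have h2 := PySem.Chars.find_le_length t.reverse q.reverse
        rw [← hpdef, List.length_reverse] at h2
        omega
      set j0 : Nat := t.length - q.length - p.toNat with hj0def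
      have hQj0 : q.isPrefixOf (t.drop j0) = true :=
        List.isPrefixOf_iff_prefix.mpr ((occ_rev t q p.toNat hbound).mp hocc)
      have hm : 0 < q.length := List.length_pos_of_ne_nil hq
      have hj0lt : j0 < t.length := by omega
      have hmax : ∀ j, j0 < j → j < t.length → q.isPrefixOf (t.drop j) = false := by
        intro j h1 h2
        by_cases hjb : j + q.length ≤ t.length
        · by_contra hc
          have hQ : q.isPrefixOf (t.drop j) = true := by simpa using hc
          have hoccj := (occ_rev t q (t.length - q.length - j) (by omega)).mpr (by
            rw [show t.length - q.length - (t.length - q.length - j) = j by omega]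
            exact List.isPrefixOf_iff_prefix.mp hQ)
          exact hmin (t.length - q.length - j) (by omega) hoccj
        · exact prefix_drop_false t q j hq (by omega)
      rw [lastIdx_greatest _ t.length j0 hj0lt hQj0 hmax, hlenp]
      omega

-- ===== VERDICT (by name: the statement is the Claim_ definition above) =====
theorem solution_spec : Claim_unchanged_solution := by
  intro s pat _ hnd
  exact main_eq s pat hnd

theorem solution_changed : Claim_changed_solution := by
  unfold Claim_changed_solution; decide

theorem solution_tight : Claim_exact_solution := by
  intro s pat _ hD heq
  obtain ⟨hp, hs⟩ := hD
  subst hp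
  have hn : s.toList.length ≠ 0 := fun hc =>
    hs (String.toList_eq_nil_iff.mp (List.length_eq_zero_iff.mp hc))
  have hlen : PySem.Str.len s = ((s.toList.length : Nat) : Int) := by simp [pysem]
  have hQ : ∀ j : Nat, (fun j => ("" : String).toList.isPrefixOf (s.toList.drop j)) j = true := by
    intro j; rfl
  -- A's index is len-1, B's is len
  have hA : solution s "" = PySem.Str.slice s none
      (some ((lastIdx (fun j => ("" : String).toList.isPrefixOf (s.toList.drop j)) s.toList.length)
        + PySem.Str.len "")) := by
    show PySem.Str.slice s none _ = _
    rw [hlen, foldA_eq_lastIdx]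
  have hfind0 : PySem.Chars.find s.toList.reverse (("" : String).toList.reverse) = 0 :=
    PySem.Chars.find_nil _
  have hB : solution_alt s "" = PySem.Str.slice s none
      (some ((PySem.Str.len s - PySem.Str.len "" - 0) + PySem.Str.len "")) := by
    show PySem.Str.slice s none _ = _
    rw [hfind0, if_pos (by norm_num)]
  rw [hA, hB] at heq
  obtain ⟨m, hm⟩ : ∃ m, s.toList.length = m + 1 := ⟨s.toList.length - 1, by omega⟩
  rw [hm] at heq
  rw [show lastIdx (fun j => ("" : String).toList.isPrefixOf (s.toList.drop j)) (m + 1) = (m : Int) from by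
    show (if _ then _ else _) = _; rw [if_pos (hQ m)]] at heq
  -- the two slices have different lengths
  have hlens := congrArg (fun x : String => x.toList.length) heq
  simp only at hlens
  have hzero : PySem.Str.len "" = (0 : Int) := rfl
  rw [hzero, hlen, hm] at hlens
  have h1 : (PySem.Str.slice s none (some ((m : Int) + 0))).toList
      = s.toList.take m := by
    rw [show ((m : Int) + 0) = ((m : Nat) : Int) by ring]
    simp [pysem, PySem.List.slice_to_natCast]
  have h2 : (PySem.Str.slice s none (some ((((m+1 : Nat) : Int) - 0 - 0) + 0))).toList
      = s.toList.take (m+1) := by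
    rw [show ((((m+1 : Nat) : Int) - 0 - 0) + 0) = ((m+1 : Nat) : Int) by ring]
    simp only [pysem]
  rw [h1, h2] at hlens
  rw [List.length_take, List.length_take, hm] at hlens
  omega
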